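-- pv_equiv track=rewrite | github.com/Alset-Nikolas/Algorithm_training_1 | июнь 2021, занятие 3/J. Пробежки по Манхэттену.py | check_t
-- ===== SOURCE A (Python) =====
-- def check_t(old_vars, t):
--     res = set()
--
--     for x_new, y_new in old_vars:
--         x_min_var = x_new - t
--         x_max_var = x_new + t
--         y_min_var = y_new - t
--         y_max_var = y_new + t
--         for x_probe in range(x_min_var, x_max_var + 1, 1):
--             for y_probe in range(y_min_var, y_max_var + 1, 1):
--                 if abs(x_new - x_probe) + abs(y_new - y_probe) <= t:
--                     res.add((x_probe, y_probe))
--     return res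
-- ===== SOURCE B (Python) =====
-- def check_t(old_vars, t):
--     res = set()
--     if old_vars:  # nothing to translate: skip precomputing the diamond
--         # stage 1: the diamond of Manhattan offsets, computed once
--         offsets = [(dx, dy)
--                    for dx in range(-t, t + 1)
--                    for dy in range(abs(dx) - t, t - abs(dx) + 1)]
--         # stage 2: translate the precomputed diamond to every point
--         for x, y in old_vars:
--             for dx, dy in offsets:
--                 res.add((x + dx, y + dy))
--     return res
-- ===== Notes on version B (the rewrite author's own statement) =====
-- stated objective: alternative
-- what changed: B precomputes the diamond of Manhattan offsets once as a flat list (inner dy-range shrinking with |dx|, no distance test at all) and then just translates that fixed offset list to every point, instead of A's per-point scan of the full (2t+1)x(2t+1) box filtering each cell by abs(dx)+abs(dy)<=t.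
import Mathlib
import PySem

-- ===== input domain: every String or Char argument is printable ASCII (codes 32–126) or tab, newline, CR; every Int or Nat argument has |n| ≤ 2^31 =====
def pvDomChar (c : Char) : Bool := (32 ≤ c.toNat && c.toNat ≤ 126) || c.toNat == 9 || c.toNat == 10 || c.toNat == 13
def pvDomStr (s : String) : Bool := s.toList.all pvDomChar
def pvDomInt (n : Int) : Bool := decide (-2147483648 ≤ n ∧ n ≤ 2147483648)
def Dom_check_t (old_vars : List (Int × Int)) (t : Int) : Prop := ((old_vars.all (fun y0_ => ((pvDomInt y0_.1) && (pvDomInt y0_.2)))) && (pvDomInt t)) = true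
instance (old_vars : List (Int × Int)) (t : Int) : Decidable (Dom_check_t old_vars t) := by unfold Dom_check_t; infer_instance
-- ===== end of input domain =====

-- B precomputes the diamond of Manhattan offsets once as a flat list and translates it to every point, replacing A's per-point filtered box scan; same result set in the same insertion order.

-- ===== PORT A =====
def check_t (old_vars : List (Int × Int)) (t : Int) : List (Int × Int) :=
  old_vars.foldl (fun res p =>
    (PySem.List.pyRange (p.1 - t) (p.1 + t + 1) 1).foldl (fun res x_probe =>
      (PySem.List.pyRange (p.2 - t) (p.2 + t + 1) 1).foldl (fun res y_probe =>
        if |p.1 - x_probe| + |p.2 - y_probe| ≤ t then PySem.Set.add res (x_probe, y_probe) else res)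
        res) res) PySem.Set.empty

-- ===== PORT B =====
def check_t_alt (old_vars : List (Int × Int)) (t : Int) : List (Int × Int) :=
  if old_vars.isEmpty then PySem.Set.empty    -- nothing to translate: skip precomputing the diamond
  else
    let offsets : List (Int × Int) :=
      (PySem.List.pyRange (-t) (t + 1) 1).flatMap (fun dx =>
        (PySem.List.pyRange (|dx| - t) (t - |dx| + 1) 1).map (fun dy => (dx, dy)))
    old_vars.foldl (fun res p =>
      offsets.foldl (fun res o => PySem.Set.add res (p.1 + o.1, p.2 + o.2)) res)
      PySem.Set.empty

-- ===== PRECONDITION & SPEC =====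
def Spec_check_t (old_vars : List (Int × Int)) (t : Int) (out : List (Int × Int)) : Prop := out = check_t_alt old_vars t
instance (old_vars : List (Int × Int)) (t : Int) (out : List (Int × Int)) : Decidable (Spec_check_t old_vars t out) := by unfold Spec_check_t; infer_instance

-- ===== CLAIM (what is proved, stated in full; the proofs are below) =====
def Claim_equal_check_t : Prop := ∀ (old_vars : List (Int × Int)) (t : Int), Dom_check_t old_vars t → Spec_check_t old_vars t (check_t old_vars t)

-- ===== LEMMAS AND PROOFS =====

-- a fold whose guard fails on every element of the list is the identity
lemma foldl_if_id {α β : Type} (c : β → Prop) [DecidablePred c] (f : α → β → α)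
    (l : List β) (s : α) (h : ∀ b ∈ l, ¬ c b) :
    l.foldl (fun s b => if c b then f s b else s) s = s := by
  induction l generalizing s with
  | nil => rfl
  | cons b l ih =>
    simp only [List.foldl_cons, if_neg (h b (List.mem_cons_self))]
    exact ih s (fun b' hb' => h b' (List.mem_cons_of_mem _ hb'))

-- a fold whose guard holds on every element of the list drops the guard
lemma foldl_if_true {α β : Type} (c : β → Prop) [DecidablePred c] (f : α → β → α)
    (l : List β) (s : α) (h : ∀ b ∈ l, c b) :
    l.foldl (fun s b => if c b then f s b else s) s = l.foldl f s := by
  induction l generalizing s with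
  | nil => rfl
  | cons b l ih =>
    simp only [List.foldl_cons, if_pos (h b (List.mem_cons_self))]
    exact ih (f s b) (fun b' hb' => h b' (List.mem_cons_of_mem _ hb'))

-- folding over a flatMap is the nested fold
lemma foldl_flatMap' {α β γ : Type} (f : α → γ → α) (g : β → List γ) (l : List β) (s : α) :
    (l.flatMap g).foldl f s = l.foldl (fun s b => (g b).foldl f s) s := by
  induction l generalizing s with
  | nil => rfl
  | cons b l ih => simp [List.flatMap_cons, List.foldl_append, ih]

-- the inner y-scan of the box with the Manhattan filter is exactly the diamond row
lemma inner_eq (x y t dx : Int) (hdx : |dx| ≤ t) (s : List (Int × Int)) :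
    (PySem.List.pyRange (y - t) (y + t + 1) 1).foldl (fun res y_probe =>
        if |x - (x + dx)| + |y - y_probe| ≤ t then PySem.Set.add res (x + dx, y_probe) else res) s
    = (PySem.List.pyRange (|dx| - t) (t - |dx| + 1) 1).foldl (fun res dy =>
        PySem.Set.add res (x + dx, y + dy)) s := by
  have habs : x - (x + dx) = -dx := by ring
  have habs0 : (0:Int) ≤ |dx| := abs_nonneg dx
  simp only [habs, abs_neg]
  rw [PySem.List.pyRange_one_append (y - t) (y - (t - |dx|)) (y + t + 1) (by omega) (by omega),
      PySem.List.pyRange_one_append (y - (t - |dx|)) (y + (t - |dx|) + 1) (y + t + 1) (by omega) (by omega),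
      List.foldl_append, List.foldl_append]
  rw [foldl_if_id (fun y_probe => |dx| + |y - y_probe| ≤ t) _ _ s
        (by intro b hb; rw [PySem.List.mem_pyRange_one] at hb
            intro hc
            have h1 := le_abs_self (y - b)
            have h2 := neg_abs_le (y - b)
            omega)]
  rw [foldl_if_true (fun y_probe => |dx| + |y - y_probe| ≤ t) _ _ s
        (by intro b hb; rw [PySem.List.mem_pyRange_one] at hb
            have : |y - b| ≤ t - |dx| := by rw [abs_le]; omega
            omega)]
  rw [foldl_if_id (fun y_probe => |dx| + |y - y_probe| ≤ t) _ _ _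
        (by intro b hb; rw [PySem.List.mem_pyRange_one] at hb
            intro hc
            have h1 := le_abs_self (y - b)
            have h2 := neg_abs_le (y - b)
            omega)]
  -- shift the diamond row from absolute y-coordinates to offsets dy
  have hsh : PySem.List.pyRange (y - (t - |dx|)) (y + (t - |dx|) + 1) 1
      = (PySem.List.pyRange (|dx| - t) (t - |dx| + 1) 1).map (fun dy => y + dy) := by
    rw [PySem.List.pyRange_one, PySem.List.pyRange_one]
    have : (y + (t - |dx|) + 1 - (y - (t - |dx|))) = (t - |dx| + 1 - (|dx| - t)) := by ring
    rw [this, List.map_map]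
    apply List.map_congr_left
    intro k _
    simp [Function.comp]
    omega
  rw [hsh, List.foldl_map]

-- processing one point: A's filtered box scan equals B's fold over the offset list
lemma point_eq (t : Int) (s : List (Int × Int)) (p : Int × Int) :
    (PySem.List.pyRange (p.1 - t) (p.1 + t + 1) 1).foldl (fun res x_probe =>
        (PySem.List.pyRange (p.2 - t) (p.2 + t + 1) 1).foldl (fun res y_probe =>
          if |p.1 - x_probe| + |p.2 - y_probe| ≤ t then PySem.Set.add res (x_probe, y_probe) else res)
          res) s
    = ((PySem.List.pyRange (-t) (t + 1) 1).flatMap (fun dx =>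
        (PySem.List.pyRange (|dx| - t) (t - |dx| + 1) 1).map (fun dy => (dx, dy)))).foldl
        (fun res o => PySem.Set.add res (p.1 + o.1, p.2 + o.2)) s := by
  rw [foldl_flatMap']
  -- shift the outer x-scan to offsets dx
  have hsh : PySem.List.pyRange (p.1 - t) (p.1 + t + 1) 1
      = (PySem.List.pyRange (-t) (t + 1) 1).map (fun dx => p.1 + dx) := by
    rw [PySem.List.pyRange_one, PySem.List.pyRange_one]
    have : (p.1 + t + 1 - (p.1 - t)) = (t + 1 - -t) := by ring
    rw [this, List.map_map]
    apply List.map_congr_left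
    intro k _
    simp [Function.comp]
    omega
  rw [hsh, List.foldl_map]
  apply PySem.List.foldl_congr_mem
  intro res dx hdx
  rw [PySem.List.mem_pyRange_one] at hdx
  have hle : |dx| ≤ t := by rw [abs_le]; omega
  rw [List.foldl_map]
  exact inner_eq p.1 p.2 t dx hle res

-- ===== VERDICT (by name: the statement is the Claim_ definition above) =====
theorem check_t_spec : Claim_equal_check_t := by
  intro old_vars t _
  unfold Spec_check_t check_t check_t_alt
  cases old_vars with
  | nil => rfl
  | cons q l =>
    rw [if_neg (by simp)]
    apply PySem.List.foldl_congr_mem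
    intro s p _
    exact point_eq t s p
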